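-- pv_equiv track=rewrite | github.com/andradebru/lista-de-exercicios-python-brasil | secao_03_estrutura_de_repeticao/ex_37_senso_de_academia.py | descobrir_maior_peso
-- ===== SOURCE A (Python) =====
-- def descobrir_maior_peso(cadastro):
--     cliente_menor_peso = None
--     cliente_maior_peso = None
--     maior_peso = None
--     menor_peso = None
--
--     for (nome, altura, peso) in cadastro:
--         if menor_peso is None or peso < menor_peso:
--             cliente_menor_peso = nome
--             menor_peso = peso
--         if maior_peso is None or peso > maior_peso:
--             cliente_maior_peso = nome
--             maior_peso = peso
--     return cliente_menor_peso, menor_peso, cliente_maior_peso, maior_peso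
-- ===== SOURCE B (Python) =====
-- def descobrir_maior_peso(cadastro):
--     if not cadastro:
--         return None, None, None, None
--     menor = min(cadastro, key=lambda c: c[2])
--     maior = max(cadastro, key=lambda c: c[2])
--     return menor[0], menor[2], maior[0], maior[2]
-- ===== Notes on version B (the rewrite author's own statement) =====
-- stated objective: idiomatic
-- what changed: Replaced the hand-rolled four-variable running min/max loop by an empty guard plus builtin min/max with a weight key (both return the first extremal element, matching A's strict comparisons).
import Mathlib
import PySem

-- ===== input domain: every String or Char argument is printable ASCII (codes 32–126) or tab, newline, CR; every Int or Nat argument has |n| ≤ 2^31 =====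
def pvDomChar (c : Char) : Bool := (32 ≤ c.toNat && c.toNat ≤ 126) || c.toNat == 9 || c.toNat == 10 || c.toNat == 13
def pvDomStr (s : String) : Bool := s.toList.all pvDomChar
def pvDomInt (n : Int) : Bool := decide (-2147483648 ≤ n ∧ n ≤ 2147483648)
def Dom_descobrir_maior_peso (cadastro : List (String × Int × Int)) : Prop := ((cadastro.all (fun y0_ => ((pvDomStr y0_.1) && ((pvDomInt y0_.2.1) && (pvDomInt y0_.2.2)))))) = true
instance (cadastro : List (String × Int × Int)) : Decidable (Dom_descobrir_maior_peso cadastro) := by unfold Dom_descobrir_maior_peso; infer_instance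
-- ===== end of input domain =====

-- B replaces A's four-variable running min/max loop by an empty guard plus min/max with a weight key (idiomatic; same cost).

-- ===== PORT A =====
-- one loop iteration of A: update (cliente_menor, menor_peso, cliente_maior, maior_peso)
def pvStepA (s : Option String × Option Int × Option String × Option Int)
    (row : String × Int × Int) : Option String × Option Int × Option String × Option Int :=
  let nome := row.1
  let peso := row.2.2
  let mn : Option String × Option Int :=
    match s.2.1 with
    | none => (some nome, some peso)
    | some m => if peso < m then (some nome, some peso) else (s.1, s.2.1)
  let mx : Option String × Option Int :=
    match s.2.2.2 with
    | none => (some nome, some peso)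
    | some M => if M < peso then (some nome, some peso) else (s.2.2.1, s.2.2.2)
  (mn.1, mn.2, mx.1, mx.2)

def descobrir_maior_peso (cadastro : List (String × Int × Int)) :
    Option String × Option Int × Option String × Option Int :=
  cadastro.foldl pvStepA (none, none, none, none)

-- ===== PORT B =====
def descobrir_maior_peso_alt (cadastro : List (String × Int × Int)) :
    Option String × Option Int × Option String × Option Int :=
  if cadastro = [] then (none, none, none, none)
  else
    match PySem.List.min? cadastro (fun c => c.2.2), PySem.List.max? cadastro (fun c => c.2.2) with
    | some mn, some mx => (some mn.1, some mn.2.2, some mx.1, some mx.2.2)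
    | _, _ => (none, none, none, none)

-- ===== PRECONDITION & SPEC =====
def Spec_descobrir_maior_peso (cadastro : List (String × Int × Int)) (out : Option String × Option Int × Option String × Option Int) : Prop := out = descobrir_maior_peso_alt cadastro
instance (cadastro : List (String × Int × Int)) (out : Option String × Option Int × Option String × Option Int) : Decidable (Spec_descobrir_maior_peso cadastro out) := by unfold Spec_descobrir_maior_peso; infer_instance

-- ===== CLAIM (what is proved, stated in full; the proofs are below) =====
def Claim_equal_descobrir_maior_peso : Prop := ∀ (cadastro : List (String × Int × Int)), Dom_descobrir_maior_peso cadastro → Spec_descobrir_maior_peso cadastro (descobrir_maior_peso cadastro)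

-- ===== LEMMAS AND PROOFS =====

-- the fold step of PySem.List.min? / max? with key (fun c => c.2.2)
def pvKmin (acc : Option (String × Int × Int)) (x : String × Int × Int) : Option (String × Int × Int) :=
  match acc with
  | none => some x
  | some m => if x.2.2 < m.2.2 then some x else some m

def pvKmax (acc : Option (String × Int × Int)) (x : String × Int × Int) : Option (String × Int × Int) :=
  match acc with
  | none => some x
  | some m => if m.2.2 < x.2.2 then some x else some m

-- project an optional extremal row to A's (name, weight) pair of variables
def pvProj : Option (String × Int × Int) → Option String × Option Int
  | none => (none, none)
  | some c => (some c.1, some c.2.2)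

theorem pvLoop_eq (xs : List (String × Int × Int)) :
    ∀ (m M : Option (String × Int × Int)),
    List.foldl pvStepA ((pvProj m).1, (pvProj m).2, (pvProj M).1, (pvProj M).2) xs
      = ((pvProj (List.foldl pvKmin m xs)).1, (pvProj (List.foldl pvKmin m xs)).2,
         (pvProj (List.foldl pvKmax M xs)).1, (pvProj (List.foldl pvKmax M xs)).2) := by
  induction xs with
  | nil => intro m M; rfl
  | cons x t ih =>
    intro m M
    have hstep : pvStepA ((pvProj m).1, (pvProj m).2, (pvProj M).1, (pvProj M).2) x
        = ((pvProj (pvKmin m x)).1, (pvProj (pvKmin m x)).2,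
           (pvProj (pvKmax M x)).1, (pvProj (pvKmax M x)).2) := by
      cases m <;> cases M <;> simp only [pvStepA, pvKmin, pvKmax, pvProj] <;> split_ifs <;> simp
    simp only [List.foldl]
    rw [hstep, ih]

theorem pvKmin_isSome (t : List (String × Int × Int)) :
    ∀ c, ∃ d, List.foldl pvKmin (some c) t = some d := by
  induction t with
  | nil => intro c; exact ⟨c, rfl⟩
  | cons x t ih =>
    intro c
    simp only [List.foldl, pvKmin]
    split_ifs <;> exact ih _

theorem pvKmax_isSome (t : List (String × Int × Int)) :
    ∀ c, ∃ d, List.foldl pvKmax (some c) t = some d := by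
  induction t with
  | nil => intro c; exact ⟨c, rfl⟩
  | cons x t ih =>
    intro c
    simp only [List.foldl, pvKmax]
    split_ifs <;> exact ih _

theorem pvMin?_eq (xs : List (String × Int × Int)) :
    PySem.List.min? xs (fun c => c.2.2) = List.foldl pvKmin none xs := by
  unfold PySem.List.min?
  congr 1
  funext acc x
  cases acc <;> rfl

theorem pvMax?_eq (xs : List (String × Int × Int)) :
    PySem.List.max? xs (fun c => c.2.2) = List.foldl pvKmax none xs := by
  unfold PySem.List.max?
  congr 1
  funext acc x
  cases acc <;> rfl

-- ===== VERDICT (by name: the statement is the Claim_ definition above) =====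
theorem descobrir_maior_peso_spec : Claim_equal_descobrir_maior_peso := by
  intro cadastro _
  unfold Spec_descobrir_maior_peso descobrir_maior_peso descobrir_maior_peso_alt
  cases cadastro with
  | nil => rfl
  | cons h t =>
    have hA := pvLoop_eq (h :: t) none none
    simp only [pvProj] at hA
    rw [hA]
    obtain ⟨mn, hmn⟩ := pvKmin_isSome t h
    obtain ⟨mx, hmx⟩ := pvKmax_isSome t h
    have h1 : List.foldl pvKmin none (h :: t) = some mn := by
      simp only [List.foldl, pvKmin]; exact hmn
    have h2 : List.foldl pvKmax none (h :: t) = some mx := by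
      simp only [List.foldl, pvKmax]; exact hmx
    rw [pvMin?_eq, pvMax?_eq, h1, h2]
    rfl
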